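-- pv_equiv track=rewrite | github.com/CWagamanEure/frictional-price-discovery | ingestion/export.py | _null_counts
-- ===== SOURCE A (Python) =====
-- from typing import Any
--
-- def _null_counts(records: list[dict[str, Any]]) -> dict[str, int]:
--     keys: set[str] = set()
--     for row in records:
--         keys.update(row.keys())
--
--     counts = {key: 0 for key in sorted(keys)}
--     for row in records:
--         for key in counts:
--             if row.get(key) is None:
--                 counts[key] += 1
--     return counts
-- ===== SOURCE B (Python) =====
-- def _null_counts(records):
--     n = len(records)
--     keys = set()
--     nonnull = {}
--     for row in records:
--         for k, v in row.items():
--             keys.add(k)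
--             if v is not None:
--                 nonnull[k] = nonnull.get(k, 0) + 1
--     return {k: n - nonnull.get(k, 0) for k in sorted(keys)}
-- ===== Notes on version B (the rewrite author's own statement) =====
-- stated objective: faster
-- what changed: Instead of scanning every (row, key) pair with a dict lookup per key (O(R*K)), B makes one pass over only the cells actually present, counting non-null values per key, and emits nulls as len(records) minus that count for each sorted key.
import Mathlib
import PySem

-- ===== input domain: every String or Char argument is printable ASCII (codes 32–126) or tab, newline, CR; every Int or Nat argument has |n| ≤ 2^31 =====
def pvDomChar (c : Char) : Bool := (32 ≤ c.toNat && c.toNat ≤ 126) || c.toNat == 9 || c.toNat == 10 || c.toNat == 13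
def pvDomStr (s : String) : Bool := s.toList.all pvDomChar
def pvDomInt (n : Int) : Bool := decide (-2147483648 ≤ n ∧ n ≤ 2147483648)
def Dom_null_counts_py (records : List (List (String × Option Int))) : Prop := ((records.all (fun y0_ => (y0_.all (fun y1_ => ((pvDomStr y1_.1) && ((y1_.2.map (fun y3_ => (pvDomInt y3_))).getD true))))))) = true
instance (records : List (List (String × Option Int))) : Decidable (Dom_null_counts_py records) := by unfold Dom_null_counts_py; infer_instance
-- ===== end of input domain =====

-- B counts non-null values per present cell in one pass and emits nulls = len(records) - nonnull per sorted key,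
-- instead of A's per-row scan over all keys with a dict lookup each.

-- ===== PORT A =====
def null_counts_py (records : List (List (String × Option Int))) : List (String × Int) :=
  -- keys = set(); for row in records: keys.update(row.keys())
  let keys : PySem.Set String :=
    records.foldl (fun s row => PySem.Set.update s (row.map Prod.fst)) PySem.Set.empty
  -- counts = {key: 0 for key in sorted(keys)}
  let counts0 : PySem.Dict String Int :=
    (PySem.List.sorted keys (fun k => k) false).foldl (fun d k => d.insert k 0) PySem.Dict.empty
  -- for row in records: for key in counts: if row.get(key) is None: counts[key] += 1
  let counts : PySem.Dict String Int :=
    records.foldl (fun c row =>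
      c.keys.foldl (fun c2 k =>
        match (PySem.Dict.mk row).get? k with
        | some (some _) => c2
        | _ => c2.modify k 0 (· + 1)) c) counts0
  counts.items

-- ===== PORT B =====
def null_counts_py_alt (records : List (List (String × Option Int))) : List (String × Int) :=
  let n : Int := records.length
  -- one pass over the present cells: collect keys, count non-null values
  let st : PySem.Set String × PySem.Dict String Int :=
    records.foldl (fun st row =>
      row.foldl (fun st2 kv =>
        (PySem.Set.add st2.1 kv.1,
         if kv.2.isSome then st2.2.insert kv.1 (st2.2.getD kv.1 0 + 1) else st2.2)) st)
      (PySem.Set.empty, PySem.Dict.empty)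
  (PySem.List.sorted st.1 (fun k => k) false).map (fun k => (k, n - st.2.getD k 0))

-- ===== PRECONDITION & SPEC =====
-- Pre_ excludes association lists in which some row has a duplicate key: a Python dict cannot hold
-- duplicate keys, so such lists do not encode any input A actually receives, and first-vs-last-match
-- behaviour on them is accidental.
def Pre_null_counts_py (records : List (List (String × Option Int))) : Prop :=
  ∀ row ∈ records, (row.map Prod.fst).Nodup
instance (records : List (List (String × Option Int))) : Decidable (Pre_null_counts_py records) := by
  unfold Pre_null_counts_py; infer_instance
def pvWitness_null_counts_py : (List (List (String × Option Int))) :=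
  [[("a", some 1), ("b", none)], [("a", none)]]
def Spec_null_counts_py (records : List (List (String × Option Int))) (out : List (String × Int)) : Prop := out = null_counts_py_alt records
instance (records : List (List (String × Option Int))) (out : List (String × Int)) : Decidable (Spec_null_counts_py records out) := by unfold Spec_null_counts_py; infer_instance

-- ===== CLAIM (what is proved, stated in full; the proofs are below) =====
def Claim_equal_null_counts_py : Prop := ∀ (records : List (List (String × Option Int))), Dom_null_counts_py records → Pre_null_counts_py records → Spec_null_counts_py records (null_counts_py records)

-- ===== LEMMAS AND PROOFS =====

-- test "row.get(key) is None" as A's inner branch sees it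
def isNull (row : List (String × Option Int)) (k : String) : Bool :=
  match (PySem.Dict.mk row).get? k with
  | some (some _) => false
  | _ => true

-- the cell predicate B counts: a present, non-null value for key j
def cellNN (j : String) (kv : String × Option Int) : Bool := kv.1 == j && kv.2.isSome

theorem match_eq_if (c2 : PySem.Dict String Int) (row : List (String × Option Int)) (k : String) :
    (match (PySem.Dict.mk row).get? k with
      | some (some _) => c2
      | _ => c2.modify k 0 (· + 1)) = if isNull row k then c2.modify k 0 (· + 1) else c2 := by
  unfold isNull
  rcases h : (PySem.Dict.mk row).get? k with _ | (_ | v) <;> simp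

theorem update_of_subset (s : PySem.Set String) (l : List String) (h : ∀ x ∈ l, x ∈ s) :
    PySem.Set.update s l = s := by
  induction l generalizing s with
  | nil => rfl
  | cons x t ih =>
      simp only [PySem.Set.update, List.foldl_cons] at *
      rw [PySem.Set.add_of_mem (h x (by simp))]
      exact ih s (fun y hy => h y (by simp [hy]))

theorem modifyFold_getD (l : List String) (c : PySem.Dict String Int) (j : String) :
    (l.foldl (fun c2 k => c2.modify k 0 (· + 1)) c).getD j 0 = c.getD j 0 + (l.count j : Int) := by
  induction l generalizing c with
  | nil => simp
  | cons a t ih =>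
      simp only [List.foldl_cons, ih, PySem.Dict.getD_modify, List.count_cons]
      by_cases h : j = a
      · simp [h]; omega
      · simp [h]; exact fun hh => h hh.symm

theorem insertZeroFold_getD (ks : List String) (d : PySem.Dict String Int) (j : String)
    (h : d.getD j 0 = 0) : (ks.foldl (fun d k => d.insert k 0) d).getD j 0 = 0 := by
  induction ks generalizing d with
  | nil => simpa using h
  | cons a t ih =>
      simp only [List.foldl_cons]
      exact ih _ (by rw [PySem.Dict.getD_insert]; split <;> simp [h])

theorem insertZeroFold_keys (ks : List String) (hnd : ks.Nodup) :
    ((ks.foldl (fun d k => d.insert k 0) (PySem.Dict.empty : PySem.Dict String Int)).keys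
        : List String) = ks := by
  rw [PySem.Dict.keys_foldl_insert]
  exact PySem.Set.ofList_eq_self_of_nodup ks hnd

-- A's per-row inner loop, with the branch written as an if on isNull
def Astep (c : PySem.Dict String Int) (row : List (String × Option Int)) : PySem.Dict String Int :=
  c.keys.foldl (fun c2 k => if isNull row k then c2.modify k 0 (· + 1) else c2) c

-- A's per-row inner loop keeps the key list
theorem A_row_keys (row : List (String × Option Int)) (c : PySem.Dict String Int) :
    ((c.keys.foldl (fun c2 k => if isNull row k then c2.modify k 0 (· + 1) else c2) c).keys
        : List String) = c.keys := by
  rw [PySem.List.foldl_if_eq_foldl_filter, PySem.Dict.keys_foldl_modify (f := fun _ _ => (· + 1))]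
  exact update_of_subset _ _ (fun x hx => List.mem_of_mem_filter hx)

-- A's per-row inner loop adds 1 at j exactly when row.get(j) is None
theorem A_row_getD (row : List (String × Option Int)) (c : PySem.Dict String Int) (j : String)
    (hnd : (c.keys : List String).Nodup) (hj : j ∈ (c.keys : List String)) :
    (c.keys.foldl (fun c2 k => if isNull row k then c2.modify k 0 (· + 1) else c2) c).getD j 0
      = c.getD j 0 + (if isNull row j then (1 : Int) else 0) := by
  rw [PySem.List.foldl_if_eq_foldl_filter, modifyFold_getD]
  have hcnt : (c.keys.filter (fun k => isNull row k)).count j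
      = if isNull row j then 1 else 0 := by
    rw [List.Nodup.count (List.Nodup.filter _ hnd)]
    by_cases h : isNull row j <;> simp [List.mem_filter, hj, h]
  rw [hcnt]; split <;> simp

-- A's outer loop body rewritten: the match is the if on isNull
theorem A_body_eq (row : List (String × Option Int)) (c : PySem.Dict String Int) :
    (c.keys.foldl (fun c2 k =>
        match (PySem.Dict.mk row).get? k with
        | some (some _) => c2
        | _ => c2.modify k 0 (· + 1)) c) = Astep c row :=
  PySem.List.foldl_congr_mem _ _ _ _ (fun acc x _ => match_eq_if acc row x)

-- A's outer loop is the fold of Astep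
theorem A_fold_eq (recs : List (List (String × Option Int))) (c : PySem.Dict String Int) :
    (recs.foldl (fun c row =>
        c.keys.foldl (fun c2 k =>
          match (PySem.Dict.mk row).get? k with
          | some (some _) => c2
          | _ => c2.modify k 0 (· + 1)) c) c) = recs.foldl Astep c :=
  PySem.List.foldl_congr_mem _ _ _ _ (fun c row _ => A_body_eq row c)

theorem A_loop_keys (recs : List (List (String × Option Int))) (c : PySem.Dict String Int) :
    ((recs.foldl Astep c).keys : List String) = c.keys := by
  induction recs generalizing c with
  | nil => rfl
  | cons row t ih =>
      rw [List.foldl_cons, ih, Astep, A_row_keys]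

theorem A_loop_getD (recs : List (List (String × Option Int))) (c : PySem.Dict String Int)
    (j : String) (hnd : (c.keys : List String).Nodup) (hj : j ∈ (c.keys : List String)) :
    (recs.foldl Astep c).getD j 0
      = c.getD j 0 + (recs.countP (fun row => isNull row j) : Int) := by
  induction recs generalizing c with
  | nil => simp
  | cons row t ih =>
      have hk : ((Astep c row).keys : List String) = c.keys := A_row_keys row c
      rw [List.foldl_cons, List.countP_cons, ih _ (hk ▸ hnd) (hk ▸ hj),
          Astep, A_row_getD row c j hnd hj]
      by_cases h : isNull row j
      · simp [h]; omega
      · simp [h]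

-- B's fold with the pair state is the keys fold and the counter fold run side by side
theorem B_split (recs : List (List (String × Option Int))) (s : PySem.Set String)
    (d : PySem.Dict String Int) :
    recs.foldl (fun st row =>
        row.foldl (fun st2 kv =>
          (PySem.Set.add st2.1 kv.1,
           if kv.2.isSome then st2.2.insert kv.1 (st2.2.getD kv.1 0 + 1) else st2.2)) st) (s, d)
    = (recs.foldl (fun s row => PySem.Set.update s (row.map Prod.fst)) s,
       recs.foldl (fun d row =>
         row.foldl (fun d2 kv =>
           if kv.2.isSome then d2.insert kv.1 (d2.getD kv.1 0 + 1) else d2) d) d) := by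
  induction recs generalizing s d with
  | nil => rfl
  | cons row t ih =>
      simp only [List.foldl_cons]
      have hrow : row.foldl (fun st2 kv =>
          (PySem.Set.add st2.1 kv.1,
           if kv.2.isSome then st2.2.insert kv.1 (st2.2.getD kv.1 0 + 1) else st2.2)) (s, d)
        = (PySem.Set.update s (row.map Prod.fst),
           row.foldl (fun d2 kv =>
             if kv.2.isSome then d2.insert kv.1 (d2.getD kv.1 0 + 1) else d2) d) := by
        have hsplit : ∀ (r : List (String × Option Int)) (s : PySem.Set String)
            (d : PySem.Dict String Int),
            r.foldl (fun st2 kv =>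
              (PySem.Set.add st2.1 kv.1,
               if kv.2.isSome then st2.2.insert kv.1 (st2.2.getD kv.1 0 + 1) else st2.2)) (s, d)
            = (r.foldl (fun s2 kv => PySem.Set.add s2 kv.1) s,
               r.foldl (fun d2 kv =>
                 if kv.2.isSome then d2.insert kv.1 (d2.getD kv.1 0 + 1) else d2) d) := by
          intro r
          induction r with
          | nil => intro s d; rfl
          | cons kv r2 ih2 => intro s d; exact ih2 _ _
        rw [hsplit]
        congr 1
        show row.foldl (fun s2 kv => PySem.Set.add s2 kv.1) s
          = (row.map Prod.fst).foldl PySem.Set.add s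
        rw [List.foldl_map]
      rw [hrow, ih]

-- value of B's counter at j after one row
theorem B_row (row : List (String × Option Int)) (d : PySem.Dict String Int) (j : String) :
    (row.foldl (fun d2 kv =>
        if kv.2.isSome then d2.insert kv.1 (d2.getD kv.1 0 + 1) else d2) d).getD j 0
      = d.getD j 0 + (row.countP (cellNN j) : Int) := by
  induction row generalizing d with
  | nil => simp
  | cons kv t ih =>
      simp only [List.foldl_cons, List.countP_cons, cellNN]
      by_cases hs : kv.2.isSome
      · by_cases hk : kv.1 = j
        · simp [hs, hk, ih]; ring
        · simp [hs, hk, ih, PySem.Dict.getD_insert, Ne.symm hk]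
      · simp [hs, ih]

theorem B_loop (recs : List (List (String × Option Int))) (d : PySem.Dict String Int) (j : String) :
    (recs.foldl (fun d row =>
        row.foldl (fun d2 kv =>
          if kv.2.isSome then d2.insert kv.1 (d2.getD kv.1 0 + 1) else d2) d) d).getD j 0
      = d.getD j 0 + ((recs.map (fun row => (row.countP (cellNN j) : Int))).sum) := by
  induction recs generalizing d with
  | nil => simp
  | cons row t ih => simp only [List.foldl_cons, ih, B_row, List.map_cons, List.sum_cons]; ring

-- with distinct keys in the row, the non-null cells at j number 0 or 1, matching A's test
theorem row_bridge (row : List (String × Option Int)) (j : String)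
    (hnd : (row.map Prod.fst).Nodup) :
    row.countP (cellNN j) = if isNull row j then 0 else 1 := by
  induction row with
  | nil => simp [isNull, PySem.Dict.get?]
  | cons kv t ih =>
      simp only [List.map_cons, List.nodup_cons] at hnd
      rw [List.countP_cons]
      unfold isNull
      rw [PySem.Dict.get?_mk_cons]
      by_cases hk : kv.1 = j
      · have ht0 : t.countP (cellNN j) = 0 := by
          rw [List.countP_eq_zero]
          intro p hp
          simp only [cellNN, Bool.and_eq_true, beq_iff_eq]
          rintro ⟨rfl, -⟩
          exact hnd.1 (hk ▸ List.mem_map_of_mem hp)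
        rcases hv : kv.2 with _ | v <;> simp [cellNN, hk, hv, ht0]
      · have hb : (kv.1 == j) = false := by simp [hk]
        simp only [hb, Bool.false_and, cellNN]
        simpa [cellNN, isNull] using ih hnd.2

-- nulls-per-key = number of rows minus non-null cells, rowwise
theorem count_arith (recs : List (List (String × Option Int))) (j : String)
    (hpre : ∀ row ∈ recs, (row.map Prod.fst).Nodup) :
    (recs.countP (fun row => isNull row j) : Int)
      = (recs.length : Int) - ((recs.map (fun row => (row.countP (cellNN j) : Int))).sum) := by
  induction recs with
  | nil => simp
  | cons row t ih =>
      have hrow := row_bridge row j (hpre row (by simp))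
      have iht := ih (fun r hr => hpre r (by simp [hr]))
      simp only [List.countP_cons, List.map_cons, List.sum_cons, List.length_cons, hrow]
      by_cases h : isNull row j <;> simp [h] at hrow ⊢ <;> push_cast [iht, hrow] <;> ring

theorem keys_nodup (recs : List (List (String × Option Int))) (s : PySem.Set String)
    (h : s.Nodup) : (recs.foldl (fun s row => PySem.Set.update s (row.map Prod.fst)) s).Nodup := by
  induction recs generalizing s with
  | nil => simpa using h
  | cons row t ih => exact ih _ (PySem.Set.nodup_update s _ h)

-- ===== VERDICT (by name: the statement is the Claim_ definition above) =====
theorem null_counts_py_spec : Claim_equal_null_counts_py := by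
  intro records _hdom hpre
  unfold Spec_null_counts_py null_counts_py null_counts_py_alt
  dsimp only
  rw [B_split, A_fold_eq]
  set K : PySem.Set String :=
    records.foldl (fun s row => PySem.Set.update s (row.map Prod.fst)) PySem.Set.empty
  have hKnd : K.Nodup := keys_nodup records PySem.Set.empty List.nodup_nil
  have hsnd : (PySem.List.sorted K (fun k => k) false).Nodup :=
    ((PySem.List.sorted_perm K (fun k => k) false).nodup_iff).mpr hKnd
  have hc0keys := insertZeroFold_keys (PySem.List.sorted K (fun k => k) false) hsnd
  have hFkeys := A_loop_keys records
    ((PySem.List.sorted K (fun k => k) false).foldl (fun d k => d.insert k 0) PySem.Dict.empty)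
  rw [hc0keys] at hFkeys
  rw [PySem.Dict.items_eq_map_keys _ (by rw [hFkeys]; exact hsnd) 0, hFkeys]
  apply List.map_congr_left
  intro j hj
  rw [A_loop_getD records _ j (by rw [hc0keys]; exact hsnd) (by rw [hc0keys]; exact hj),
      insertZeroFold_getD _ _ _ (by simp), B_loop,
      count_arith records j hpre]
  simp
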